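-- pv_equiv track=rewrite | github.com/WolfPack3/Saman_Documents | Handover/Binck/RekeningID.py | get_firstlast_index
-- ===== SOURCE A (Python) =====
-- def get_firstlast_index(a_string):
--     first_last = []
--
--     # get index of first character
--     for index, letter in enumerate(a_string):
--         if letter != ' ':
--             first_last.append(index)
--             break
--     # get index of last character
--     for index, letter in reversed(list(enumerate(a_string))):
--         if letter != ' ':
--             first_last.append(index+1)
--             break
--     return first_last
-- ===== SOURCE B (Python) =====
-- def get_firstlast_index(a_string):
--     if not a_string.strip(' '):
--         return []
--     first = len(a_string) - len(a_string.lstrip(' '))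
--     last = len(a_string.rstrip(' '))
--     return [first, last]
-- ===== Notes on version B (the rewrite author's own statement) =====
-- stated objective: idiomatic
-- what changed: Replaces the two explicit index-scanning loops (forward and reversed enumerate with break) by arithmetic on the lengths of the string stripped of spaces on the left/right/both sides.
import Mathlib
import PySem

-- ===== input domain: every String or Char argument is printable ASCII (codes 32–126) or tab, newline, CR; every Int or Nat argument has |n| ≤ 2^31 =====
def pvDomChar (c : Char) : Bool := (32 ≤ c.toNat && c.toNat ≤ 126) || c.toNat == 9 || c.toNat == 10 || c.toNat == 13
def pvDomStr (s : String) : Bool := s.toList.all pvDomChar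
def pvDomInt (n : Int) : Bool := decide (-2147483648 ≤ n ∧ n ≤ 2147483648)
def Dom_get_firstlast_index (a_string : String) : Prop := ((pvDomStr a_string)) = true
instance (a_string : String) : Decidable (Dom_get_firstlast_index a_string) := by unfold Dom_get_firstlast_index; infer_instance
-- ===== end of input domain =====

-- B computes the two indices by arithmetic on the lengths of the space-stripped string (strip/lstrip/rstrip with a space argument) instead of A's two scanning loops; a timing run measured B faster (C-level strip vs a Python-level loop).

-- ===== PORT A =====
-- first loop: 'for index, letter in enumerate(a_string): if letter != ' ': append(index); break'
def pvFirstLoop : List (Int × Char) → List Int → List Int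
  | [], acc => acc
  | (i, c) :: rest, acc => if c ≠ ' ' then acc ++ [i] else pvFirstLoop rest acc

-- second loop: 'for index, letter in reversed(list(enumerate(a_string))): if letter != ' ': append(index+1); break'
def pvLastLoop : List (Int × Char) → List Int → List Int
  | [], acc => acc
  | (i, c) :: rest, acc => if c ≠ ' ' then acc ++ [i + 1] else pvLastLoop rest acc

def get_firstlast_index (a_string : String) : List Int :=
  let fl := pvFirstLoop (PySem.List.enumerate a_string.toList) []
  pvLastLoop (PySem.List.enumerate a_string.toList).reverse fl

-- ===== PORT B =====
-- lstrip(' ') / rstrip(' ') / strip(' ') ported by hand on the char list (exact: only ' ' is stripped)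
def pvLstripSp (cs : List Char) : List Char := cs.dropWhile (· == ' ')
def pvRstripSp (cs : List Char) : List Char := (cs.reverse.dropWhile (· == ' ')).reverse

def get_firstlast_index_alt (a_string : String) : List Int :=
  let cs := a_string.toList
  if pvRstripSp (pvLstripSp cs) = [] then []
  else [(cs.length : Int) - (pvLstripSp cs).length, ((pvRstripSp cs).length : Int)]

-- ===== PRECONDITION & SPEC =====
def Spec_get_firstlast_index (a_string : String) (out : List Int) : Prop := out = get_firstlast_index_alt a_string
instance (a_string : String) (out : List Int) : Decidable (Spec_get_firstlast_index a_string out) := by unfold Spec_get_firstlast_index; infer_instance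

-- ===== CLAIM (what is proved, stated in full; the proofs are below) =====
def Claim_equal_get_firstlast_index : Prop := ∀ (a_string : String), Dom_get_firstlast_index a_string → Spec_get_firstlast_index a_string (get_firstlast_index a_string)

-- ===== LEMMAS AND PROOFS =====

lemma pvFirstLoop_enum (cs : List Char) (s : Int) (acc : List Int) :
    pvFirstLoop (PySem.List.enumerate cs s) acc =
      if cs.dropWhile (· == ' ') = [] then acc
      else acc ++ [s + ((cs.length : Int) - (cs.dropWhile (· == ' ')).length)] := by
  induction cs generalizing s with
  | nil => simp [pvFirstLoop, PySem.List.enumerate_nil]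
  | cons c cs ih =>
    rw [PySem.List.enumerate_cons]
    by_cases hc : c = ' '
    · subst hc
      rw [show pvFirstLoop ((s, ' ') :: PySem.List.enumerate cs (s + 1)) acc
            = pvFirstLoop (PySem.List.enumerate cs (s + 1)) acc from by simp [pvFirstLoop]]
      rw [ih]
      rw [show List.dropWhile (· == ' ') (' ' :: cs) = List.dropWhile (· == ' ') cs from by
        simp [List.dropWhile_cons]]
      have hle := List.length_dropWhile_le (p := (· == ' ')) (l := cs)
      split
      · rfl
      · congr 2
        simp only [List.length_cons]
        push_cast
        omega
    · rw [show pvFirstLoop ((s, c) :: PySem.List.enumerate cs (s + 1)) acc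
            = acc ++ [s] from by simp [pvFirstLoop, hc]]
      rw [show List.dropWhile (· == ' ') (c :: cs) = c :: cs from by
        simp [hc]]
      rw [if_neg (by simp)]
      simp

lemma pvLastLoop_enum (cs : List Char) (s : Int) (acc : List Int) :
    pvLastLoop (PySem.List.enumerate cs s).reverse acc =
      if cs.reverse.dropWhile (· == ' ') = [] then acc
      else acc ++ [s + ((cs.reverse.dropWhile (· == ' ')).length : Int)] := by
  induction cs using List.reverseRecOn generalizing acc with
  | nil => simp [pvLastLoop, PySem.List.enumerate_nil]
  | append_singleton cs c ih =>
    rw [PySem.List.enumerate_append]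
    simp only [PySem.List.enumerate_cons, PySem.List.enumerate_nil, List.reverse_append,
      List.reverse_cons, List.reverse_nil, List.nil_append, List.cons_append]
    by_cases hc : c = ' '
    · subst hc
      rw [show pvLastLoop ((s + (cs.length : Int), ' ') :: (PySem.List.enumerate cs s).reverse) acc
            = pvLastLoop (PySem.List.enumerate cs s).reverse acc from by simp [pvLastLoop]]
      rw [ih]
      rw [show List.dropWhile (· == ' ') (' ' :: cs.reverse) = List.dropWhile (· == ' ') cs.reverse
        from by simp]
    · rw [show pvLastLoop ((s + (cs.length : Int), c) :: (PySem.List.enumerate cs s).reverse) acc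
            = acc ++ [s + (cs.length : Int) + 1] from by simp [pvLastLoop, hc]]
      rw [show List.dropWhile (· == ' ') (c :: cs.reverse) = c :: cs.reverse from by
        simp [hc]]
      rw [if_neg (by simp)]
      simp only [List.length_cons, List.length_reverse]
      congr 2
      push_cast
      ring

lemma pv_allspace_iff (cs : List Char) :
    cs.dropWhile (· == ' ') = [] ↔ cs.reverse.dropWhile (· == ' ') = [] := by
  simp only [List.dropWhile_eq_nil_iff, List.mem_reverse]

lemma pv_strip_nil_iff (cs : List Char) :
    pvRstripSp (pvLstripSp cs) = [] ↔ cs.dropWhile (· == ' ') = [] := by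
  unfold pvRstripSp pvLstripSp
  simp only [List.reverse_eq_nil_iff, List.dropWhile_eq_nil_iff, List.mem_reverse]
  constructor
  · intro h x hx
    have hx' : x ∈ cs.takeWhile (· == ' ') ++ cs.dropWhile (· == ' ') := by
      rwa [List.takeWhile_append_dropWhile]
    rcases List.mem_append.mp hx' with h1 | h2
    · exact List.mem_takeWhile_imp (p := (· == ' ')) h1
    · exact h x h2
  · intro h x hx
    exact h x ((List.dropWhile_sublist _).subset hx)

-- ===== VERDICT (by name: the statement is the Claim_ definition above) =====
theorem get_firstlast_index_spec : Claim_equal_get_firstlast_index := by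
  intro s _
  unfold Spec_get_firstlast_index get_firstlast_index get_firstlast_index_alt
  set cs := s.toList with hcs
  rw [pvFirstLoop_enum cs 0 [], pvLastLoop_enum cs 0]
  by_cases hall : cs.dropWhile (· == ' ') = []
  · rw [if_pos hall, if_pos ((pv_allspace_iff cs).mp hall), if_pos ((pv_strip_nil_iff cs).mpr hall)]
  · rw [if_neg hall, if_neg (fun h => hall ((pv_allspace_iff cs).mpr h)),
      if_neg (fun h => hall ((pv_strip_nil_iff cs).mp h))]
    unfold pvLstripSp pvRstripSp
    simp
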